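-- pv_equiv track=rewrite | github.com/k3ut0i/aoc19 | py/day06.py | total_cumulative_orbits
-- ===== SOURCE A (Python) =====
-- def total_cumulative_orbits(om):
--     q = ['COM'] # create queue for breadth-first traversal of the tree
--     start = 0
--     end = 1
--     nl = parent_map_to_node_list(om)
--     while (start < end):
--         parent = q[start]
--         children = nl[parent] if parent in nl else []
--         start += 1
--         end += len(children)
--         q = q + children
--     corbits = {'COM':0}
--     for node in q[1:]: # iterate over the queue and fill up the orbits
--         corbits[node] = corbits[om[node]]+1
--     return corbits
--
-- def parent_map_to_node_list(pm):
--     nl = dict()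
--     for child, parent in pm.items():
--         if parent in nl:
--             nl[parent].append(child)
--         else:
--             nl[parent] = [child]
--     return nl
-- ===== SOURCE B (Python) =====
-- def total_cumulative_orbits(om):
--     # No children index and no queue: a fused loop that assigns the current
--     # level's depths, then derives the next level by rescanning the orbit pairs.
--     corbits = {}
--     level = ['COM']
--     depth = 0
--     while level:
--         for n in level:
--             corbits[n] = depth
--         level = [c for p in level for (c, q) in om.items() if q == p]
--         depth += 1
--     return corbits
-- ===== Notes on version B (the rewrite author's own statement) =====
-- stated objective: alternative
-- what changed: A builds a parent->children index dict, runs a pointer-queue BFS (q = q + children with start/end pointers) to collect all reachable nodes, and then a second fill pass that looks up each node's parent depth via om[node]; B keeps no index and no queue at all: a single fused loop that assigns the current level's depths and derives the next level by rescanning the orbit pairs ([c for p in level for (c,q) in om.items() if q == p]).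
import Mathlib
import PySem

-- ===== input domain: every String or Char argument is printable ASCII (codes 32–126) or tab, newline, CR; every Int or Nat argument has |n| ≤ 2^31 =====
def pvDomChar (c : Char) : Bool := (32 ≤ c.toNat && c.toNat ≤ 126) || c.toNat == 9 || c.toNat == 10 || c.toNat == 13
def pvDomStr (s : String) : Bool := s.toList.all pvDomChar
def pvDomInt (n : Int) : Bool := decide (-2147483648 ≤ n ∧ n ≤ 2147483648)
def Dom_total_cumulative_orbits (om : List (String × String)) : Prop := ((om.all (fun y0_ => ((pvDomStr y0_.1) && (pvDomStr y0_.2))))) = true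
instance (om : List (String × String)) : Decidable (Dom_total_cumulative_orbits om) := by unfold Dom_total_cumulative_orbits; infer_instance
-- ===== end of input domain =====

-- B replaces A's three phases (children-index dict, pointer-queue BFS, parent-lookup fill pass)
-- by one fused loop with no index and no queue: it assigns the current level's depths and derives
-- the next level by rescanning the orbit pairs; objective: alternative.

-- ===== PORT A =====
-- helper of A: parent_map_to_node_list(pm) — pm is the dict's item list
def parent_map_to_node_list (pm : List (String × String)) : PySem.Dict String (List String) :=
  pm.foldl (fun nl cp =>
    if nl.contains cp.2 then nl.modify cp.2 [] (fun l => l ++ [cp.1])   -- nl[parent].append(child)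
    else nl.insert cp.2 [cp.1]) PySem.Dict.empty

-- A's while-loop: state (q, start, end); fuel om.length+1 bounds the iteration count
-- (= final queue length ≤ 1 + number of keys) whenever Pre_ holds; the `none` arm of
-- q[start] is Python's IndexError, unreachable since end = len(q) throughout.
def tcoLoop (nl : PySem.Dict String (List String)) :
    Nat → List String → Nat → Nat → List String
  | 0, q, _, _ => q
  | fuel+1, q, start, stop =>
    if start < stop then
      match PySem.List.pyGet? q (start : Int) with
      | some parent =>
          let children := nl.getD parent []          -- nl[parent] if parent in nl else []
          tcoLoop nl fuel (q ++ children) (start+1) (stop + children.length)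
      | none => q
    else q

def total_cumulative_orbits (om : List (String × String)) : List (String × Int) :=
  let omd := PySem.Dict.ofList om
  let nl := parent_map_to_node_list omd.items
  let q := tcoLoop nl (om.length + 1) ["COM"] 0 1
  let corbits : PySem.Dict String Int :=
    (PySem.List.slice q (some 1) none).foldl (fun d node =>   -- for node in q[1:]
      match omd.get? node with                                -- om[node] (KeyError = none, unreachable under Pre_)
      | some p =>
        match d.get? p with                                   -- corbits[om[node]] (KeyError = none, unreachable under Pre_)
        | some v => d.insert node (v + 1)
        | none => d
      | none => d) (PySem.Dict.empty.insert "COM" 0)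
  corbits.items

-- ===== PORT B =====
-- B's while-loop: state (corbits, level, depth); fuel om.length+2 bounds the number of
-- levels (+1 for the final empty check) under Pre_.
def tcoAltLoop (items : List (String × String)) :
    Nat → PySem.Dict String Int → List String → Int → PySem.Dict String Int
  | 0, corbits, _, _ => corbits
  | fuel+1, corbits, level, depth =>
    if level.isEmpty then corbits
    else
      let corbits' := level.foldl (fun d n => d.insert n depth) corbits   -- for n in level: corbits[n] = depth
      -- [c for p in level for (c, q) in om.items() if q == p]
      let level' := level.flatMap (fun p => (items.filter (fun cq => cq.2 == p)).map (fun cq => cq.1))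
      tcoAltLoop items fuel corbits' level' (depth + 1)

def total_cumulative_orbits_alt (om : List (String × String)) : List (String × Int) :=
  let omd := PySem.Dict.ofList om
  (tcoAltLoop omd.items (om.length + 2) PySem.Dict.empty ["COM"] 0).items

-- ===== PRECONDITION & SPEC =====
-- parent-chain iteration in the orbit map: pvPIter omd k n follows n's parent k times
def pvPIter (omd : PySem.Dict String String) : Nat → String → Option String
  | 0, n => some n
  | k+1, n => (omd.get? n).bind (pvPIter omd k)

-- Pre_ excludes exactly the inputs on which A's BFS loop never terminates: those whose
-- parent map has a directed cycle through 'COM' (any such cycle has length ≤ om.length).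
def Pre_total_cumulative_orbits (om : List (String × String)) : Prop :=
  ∀ k < om.length + 2, 1 ≤ k → pvPIter (PySem.Dict.ofList om) k "COM" ≠ some "COM"
instance (om : List (String × String)) : Decidable (Pre_total_cumulative_orbits om) := by
  unfold Pre_total_cumulative_orbits; infer_instance

def pvWitness_total_cumulative_orbits : (List (String × String)) := [("AAA", "COM"), ("BBB", "AAA")]

def Spec_total_cumulative_orbits (om : List (String × String)) (out : List (String × Int)) : Prop := out = total_cumulative_orbits_alt om
instance (om : List (String × String)) (out : List (String × Int)) : Decidable (Spec_total_cumulative_orbits om out) := by unfold Spec_total_cumulative_orbits; infer_instance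

-- ===== CLAIM (what is proved, stated in full; the proofs are below) =====
def Claim_equal_total_cumulative_orbits : Prop := ∀ (om : List (String × String)), Dom_total_cumulative_orbits om → Pre_total_cumulative_orbits om → Spec_total_cumulative_orbits om (total_cumulative_orbits om)

-- ===== LEMMAS AND PROOFS =====

-- A's children map, as a function of the input dict
def pvNL (omd : PySem.Dict String String) : PySem.Dict String (List String) :=
  omd.items.foldl (fun nl cp => nl.modify cp.2 [] (fun l => l ++ [cp.1])) PySem.Dict.empty

-- all children of the nodes of L, in order
def pvChs (nl : PySem.Dict String (List String)) (L : List String) : List String :=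
  L.flatMap (fun p => nl.getD p [])

-- the BFS levels: level 0 = ["COM"], level (d+1) = children of level d
def pvLevel (omd : PySem.Dict String String) : Nat → List String
  | 0 => ["COM"]
  | d+1 => pvChs (pvNL omd) (pvLevel omd d)

-- concatenation of levels d, d+1, …, d+m-1
def pvLvlCat (omd : PySem.Dict String String) (d : Nat) : Nat → List String
  | 0 => []
  | m+1 => pvLevel omd d ++ pvLvlCat omd (d+1) m

-- A's fill-pass step (the lambda in port A)
def pvStepA (omd : PySem.Dict String String) (d : PySem.Dict String Int) (node : String) :
    PySem.Dict String Int :=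
  match omd.get? node with
  | some p =>
    match d.get? p with
    | some v => d.insert node (v + 1)
    | none => d
  | none => d

-- the per-level depth assignment common to both programs
def pvFill (omd : PySem.Dict String String) : Nat → Nat → PySem.Dict String Int → PySem.Dict String Int
  | _, 0, D => D
  | d, m+1, D => pvFill omd (d+1) m ((pvLevel omd (d+1)).foldl (fun dd c => dd.insert c ((d : Int)+1)) D)

theorem pv_builder_eq (pm : List (String × String)) :
    parent_map_to_node_list pm
      = pm.foldl (fun nl cp => nl.modify cp.2 [] (fun l => l ++ [cp.1])) PySem.Dict.empty := by
  have hf : (fun (nl : PySem.Dict String (List String)) (cp : String × String) =>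
      if nl.contains cp.2 then nl.modify cp.2 [] (fun l => l ++ [cp.1]) else nl.insert cp.2 [cp.1])
      = (fun nl cp => nl.modify cp.2 [] (fun l => l ++ [cp.1])) := by
    funext nl cp
    by_cases h : nl.contains cp.2
    · simp [h]
    · have h' : nl.contains cp.2 = false := by simpa using h
      have hg : nl.getD cp.2 [] = [] := PySem.Dict.getD_of_not_contains _ _ h'
      simp [h', PySem.Dict.modify, hg]
  unfold parent_map_to_node_list
  rw [hf]

theorem pv_chf_eq (omd : PySem.Dict String String) (p : String) :
    (pvNL omd).getD p [] = ((omd.items.filter (fun q => q.2 == p)).map (fun q => q.1)) := by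
  have h := PySem.Dict.getD_foldl_modify_append
    (omd.items.map (fun cp => (cp.2, cp.1))) (PySem.Dict.empty (κ := String) (ν := List String)) p
  rw [List.foldl_map] at h
  simp only [List.filter_map, List.map_map] at h
  unfold pvNL
  rw [h]
  simp [Function.comp_def]

theorem pv_mem_chf (omd : PySem.Dict String String) (hnd : omd.keys.Nodup) (c p : String) :
    c ∈ (pvNL omd).getD p [] ↔ omd.get? c = some p := by
  rw [pv_chf_eq]
  rw [PySem.Dict.get?_eq_some_iff_mem_items omd c p hnd]
  simp only [List.mem_map, List.mem_filter]
  constructor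
  · rintro ⟨q, ⟨hq, hq2⟩, rfl⟩
    have : q.2 = p := by simpa using hq2
    cases q; simp_all
  · intro h
    exact ⟨(c, p), ⟨h, by simp⟩, rfl⟩

theorem pv_nodup_chf (omd : PySem.Dict String String) (hnd : omd.keys.Nodup) (p : String) :
    ((pvNL omd).getD p []).Nodup := by
  rw [pv_chf_eq]
  have hsub : ((omd.items.filter (fun q => q.2 == p)).map (fun q => q.1)).Sublist
      (omd.items.map (fun q => q.1)) := List.Sublist.map _ List.filter_sublist
  have hk : (omd.items.map (fun q => q.1)).Nodup := by
    simpa [PySem.Dict.keys] using hnd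
  exact hk.sublist hsub

theorem pv_mem_chs (omd : PySem.Dict String String) (hnd : omd.keys.Nodup) (c : String)
    (L : List String) :
    c ∈ pvChs (pvNL omd) L ↔ ∃ p ∈ L, omd.get? c = some p := by
  unfold pvChs
  rw [List.mem_flatMap]
  constructor
  · rintro ⟨p, hp, hc⟩
    exact ⟨p, hp, (pv_mem_chf omd hnd c p).mp hc⟩
  · rintro ⟨p, hp, hc⟩
    exact ⟨p, hp, (pv_mem_chf omd hnd c p).mpr hc⟩

theorem pv_nodup_chs (omd : PySem.Dict String String) (hnd : omd.keys.Nodup)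
    (L : List String) (hL : L.Nodup) : (pvChs (pvNL omd) L).Nodup := by
  induction L with
  | nil => simp [pvChs]
  | cons p L ih =>
    rw [List.nodup_cons] at hL
    have hdis : List.Disjoint ((pvNL omd).getD p []) (pvChs (pvNL omd) L) := by
      intro x hx1 hx2
      rw [pv_mem_chf omd hnd] at hx1
      rw [pv_mem_chs omd hnd] at hx2
      obtain ⟨p', hp', hg⟩ := hx2
      rw [hx1] at hg
      have : p = p' := by simpa using hg
      exact hL.1 (this ▸ hp')
    have : pvChs (pvNL omd) (p :: L) = (pvNL omd).getD p [] ++ pvChs (pvNL omd) L := by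
      simp [pvChs]
    rw [this]
    exact (pv_nodup_chf omd hnd p).append (ih hL.2) hdis

theorem pv_pIter_add (omd : PySem.Dict String String) (a b : Nat) :
    ∀ n, pvPIter omd (a + b) n = (pvPIter omd a n).bind (pvPIter omd b) := by
  induction a with
  | zero => intro n; simp [pvPIter]
  | succ a ih =>
    intro n
    have h1 : a + 1 + b = (a + b) + 1 := by omega
    rw [h1]
    show (omd.get? n).bind (pvPIter omd (a + b)) = ((omd.get? n).bind (pvPIter omd a)).bind (pvPIter omd b)
    cases h : omd.get? n with
    | none => simp
    | some x => simp [ih x]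

theorem pv_mem_level (omd : PySem.Dict String String) (hnd : omd.keys.Nodup) (d : Nat) (n : String) :
    n ∈ pvLevel omd d ↔ pvPIter omd d n = some "COM" := by
  induction d generalizing n with
  | zero => simp [pvLevel, pvPIter]
  | succ d ih =>
    show n ∈ pvChs (pvNL omd) (pvLevel omd d) ↔ _
    rw [pv_mem_chs omd hnd]
    constructor
    · rintro ⟨p, hp, hg⟩
      rw [ih] at hp
      show (omd.get? n).bind (pvPIter omd d) = some "COM"
      rw [hg]
      simpa using hp
    · intro h
      replace h : (omd.get? n).bind (pvPIter omd d) = some "COM" := h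
      cases hg : omd.get? n with
      | none => rw [hg] at h; simp at h
      | some p =>
        rw [hg] at h
        simp at h
        exact ⟨p, (ih p).mpr h, rfl⟩

theorem pv_level_disjoint (omd : PySem.Dict String String) (N : Nat) (hnd : omd.keys.Nodup)
    (HP : ∀ k, 1 ≤ k → k ≤ N → pvPIter omd k "COM" ≠ some "COM")
    {d e : Nat} (hde : d < e) (he : e ≤ N) (n : String)
    (h1 : n ∈ pvLevel omd d) (h2 : n ∈ pvLevel omd e) : False := by
  rw [pv_mem_level omd hnd] at h1 h2
  have he' : e = d + (e - d) := by omega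
  rw [he', pv_pIter_add] at h2
  rw [h1] at h2
  simp at h2
  exact HP (e - d) (by omega) (by omega) h2

theorem pv_nodup_level (omd : PySem.Dict String String) (hnd : omd.keys.Nodup) (d : Nat) :
    (pvLevel omd d).Nodup := by
  induction d with
  | zero => simp [pvLevel]
  | succ d ih => exact pv_nodup_chs omd hnd _ ih

theorem pv_level_sub_keys (omd : PySem.Dict String String) (hnd : omd.keys.Nodup) (d : Nat)
    (n : String) (h : n ∈ pvLevel omd (d+1)) : n ∈ omd.keys := by
  have h' : n ∈ pvChs (pvNL omd) (pvLevel omd d) := h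
  rw [pv_mem_chs omd hnd] at h'
  obtain ⟨p, _, hg⟩ := h'
  by_contra hk
  rw [← PySem.Dict.get?_eq_none_iff_not_mem_keys] at hk
  rw [hk] at hg
  simp at hg

theorem pv_lvlCat_succ_right (omd : PySem.Dict String String) (m : Nat) :
    ∀ d, pvLvlCat omd d (m+1) = pvLvlCat omd d m ++ pvLevel omd (d+m) := by
  induction m with
  | zero => intro d; simp [pvLvlCat]
  | succ m ih =>
    intro d
    show pvLevel omd d ++ pvLvlCat omd (d+1) (m+1) = (pvLevel omd d ++ pvLvlCat omd (d+1) m) ++ _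
    rw [ih (d+1), List.append_assoc]
    have : d + 1 + m = d + (m + 1) := by omega
    rw [this]

theorem pv_mem_lvlCat (omd : PySem.Dict String String) (m : Nat) :
    ∀ d n, n ∈ pvLvlCat omd d m ↔ ∃ i < m, n ∈ pvLevel omd (d+i) := by
  induction m with
  | zero => intro d n; simp [pvLvlCat]
  | succ m ih =>
    intro d n
    show n ∈ pvLevel omd d ++ pvLvlCat omd (d+1) m ↔ _
    rw [List.mem_append, ih (d+1) n]
    constructor
    · rintro (h | ⟨i, hi, h⟩)
      · exact ⟨0, by omega, by simpa using h⟩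
      · exact ⟨i+1, by omega, by rw [show d + (i+1) = d+1+i by omega]; exact h⟩
    · rintro ⟨i, hi, h⟩
      cases i with
      | zero => left; simpa using h
      | succ i => right; exact ⟨i, by omega, by rw [show d+1+i = d + (i+1) by omega]; exact h⟩

theorem pv_nodup_lvlCat (omd : PySem.Dict String String) (N : Nat) (hnd : omd.keys.Nodup)
    (HP : ∀ k, 1 ≤ k → k ≤ N → pvPIter omd k "COM" ≠ some "COM")
    (m : Nat) : ∀ d, d + m ≤ N + 1 → (pvLvlCat omd d m).Nodup := by
  induction m with
  | zero => intro d _; simp [pvLvlCat]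
  | succ m ih =>
    intro d hdm
    show (pvLevel omd d ++ pvLvlCat omd (d+1) m).Nodup
    refine (pv_nodup_level omd hnd d).append (ih (d+1) (by omega)) ?_
    intro x hx1 hx2
    rw [pv_mem_lvlCat] at hx2
    obtain ⟨i, hi, hx2⟩ := hx2
    exact pv_level_disjoint omd N hnd HP (show d < d+1+i by omega) (by omega) x hx1 hx2

theorem pv_lvlCat_sub_keys (omd : PySem.Dict String String) (hnd : omd.keys.Nodup)
    (m : Nat) (n : String) (h : n ∈ pvLvlCat omd 1 m) : n ∈ omd.keys := by
  rw [pv_mem_lvlCat] at h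
  obtain ⟨i, hi, h⟩ := h
  rw [show 1 + i = i + 1 by omega] at h
  exact pv_level_sub_keys omd hnd i n h

theorem pv_level_empty_add (omd : PySem.Dict String String) (i : Nat) :
    ∀ d, pvLevel omd d = [] → pvLevel omd (d + i) = [] := by
  induction i with
  | zero => intro d h; simpa using h
  | succ i ih =>
    intro d h
    rw [show d + (i+1) = (d+i) + 1 by omega]
    show pvChs (pvNL omd) (pvLevel omd (d+i)) = []
    rw [ih d h]
    simp [pvChs]

theorem pv_lvlCat_len_ge (omd : PySem.Dict String String) (m : Nat) :
    ∀ d, (∀ i < m, pvLevel omd (d + i) ≠ []) → m ≤ (pvLvlCat omd d m).length := by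
  induction m with
  | zero => intro d _; simp [pvLvlCat]
  | succ m ih =>
    intro d h
    show m + 1 ≤ (pvLevel omd d ++ pvLvlCat omd (d+1) m).length
    rw [List.length_append]
    have h0 : pvLevel omd d ≠ [] := by simpa using h 0 (by omega)
    have h1 : 1 ≤ (pvLevel omd d).length := by
      cases hq : pvLevel omd d with
      | nil => exact absurd hq h0
      | cons a l => simp
    have h2 := ih (d+1) (fun i hi => by
      have := h (i+1) (by omega)
      rwa [show d + (i+1) = d+1+i by omega] at this)
    omega

theorem pv_length_le_of_nodup_subset (l l' : List String) (h : l.Nodup) (hs : l ⊆ l') :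
    l.length ≤ l'.length := by
  calc l.length = l.toFinset.card := (List.toFinset_card_of_nodup h).symm
  _ ≤ l'.toFinset.card := Finset.card_le_card (by intro x hx; simp at hx ⊢; exact hs hx)
  _ ≤ l'.length := l'.toFinset_card_le

theorem pv_level_N_empty (omd : PySem.Dict String String) (N : Nat) (hnd : omd.keys.Nodup)
    (HP : ∀ k, 1 ≤ k → k ≤ N → pvPIter omd k "COM" ≠ some "COM")
    (hK : omd.keys.length < N) : pvLevel omd N = [] := by
  by_contra hne
  have hall : ∀ i < N, pvLevel omd (1 + i) ≠ [] := by
    intro i hi hempty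
    have h2 := pv_level_empty_add omd (N - (1+i)) (1+i) hempty
    rw [show 1 + i + (N - (1+i)) = N by omega] at h2
    exact hne h2
  have hlen := pv_lvlCat_len_ge omd N 1 hall
  have hnodup := pv_nodup_lvlCat omd N hnd HP N 1 (by omega)
  have hsub : pvLvlCat omd 1 N ⊆ omd.keys := fun n hn => pv_lvlCat_sub_keys omd hnd N n hn
  have hle := pv_length_le_of_nodup_subset _ _ hnodup hsub
  omega

theorem pv_tco_stop (nl : PySem.Dict String (List String)) (fuel : Nat) (q : List String) (s : Nat) :
    tcoLoop nl fuel q s s = q := by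
  cases fuel with
  | zero => rfl
  | succ fuel => simp [tcoLoop]

theorem pv_A_block (nl : PySem.Dict String (List String)) (L : List String) :
    ∀ (done ext : List String) (fuel : Nat),
    tcoLoop nl (L.length + fuel) (done ++ (L ++ ext)) done.length
        (done.length + (L.length + ext.length))
      = tcoLoop nl fuel ((done ++ (L ++ ext)) ++ pvChs nl L) (done.length + L.length)
        ((done.length + (L.length + ext.length)) + (pvChs nl L).length) := by
  induction L with
  | nil =>
    intro done ext fuel
    simp [pvChs]
  | cons p L ih =>
    intro done ext fuel
    have hstep : tcoLoop nl ((p :: L).length + fuel) (done ++ (p :: L ++ ext)) done.length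
        (done.length + ((p :: L).length + ext.length))
        = tcoLoop nl (L.length + fuel) ((done ++ (p :: L ++ ext)) ++ nl.getD p [])
          (done.length + 1)
          ((done.length + ((p :: L).length + ext.length)) + (nl.getD p []).length) := by
      rw [show (p :: L).length + fuel = (L.length + fuel) + 1 by simp only [List.length_cons]; omega]
      show (if done.length < done.length + ((p :: L).length + ext.length) then _ else _) = _
      rw [if_pos (by simp only [List.length_cons]; omega)]
      have hget : PySem.List.pyGet? (done ++ (p :: L ++ ext)) (done.length : Int) = some p := by
        have h0 : done ++ (p :: L ++ ext) = done ++ p :: (L ++ ext) := by simp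
        rw [h0, PySem.List.pyGet?_append_length]
      rw [hget]
    rw [hstep]
    have H := ih (done ++ [p]) (ext ++ nl.getD p []) fuel
    have e1 : (done ++ [p]) ++ (L ++ (ext ++ nl.getD p []))
        = (done ++ (p :: L ++ ext)) ++ nl.getD p [] := by simp
    have e2 : (done ++ [p]).length = done.length + 1 := by simp
    have e3 : done.length + 1 + (L.length + (ext ++ nl.getD p []).length)
        = (done.length + ((p :: L).length + ext.length)) + (nl.getD p []).length := by
      simp only [List.length_append, List.length_cons]; omega
    rw [e1, e2, e3] at H
    rw [H]
    have e4 : ((done ++ (p :: L ++ ext)) ++ nl.getD p []) ++ pvChs nl L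
        = (done ++ (p :: L ++ ext)) ++ pvChs nl (p :: L) := by
      simp [pvChs]
    have e5 : done.length + 1 + L.length = done.length + (p :: L).length := by simp only [List.length_cons]; omega
    have e6 : ((done.length + ((p :: L).length + ext.length)) + (nl.getD p []).length) + (pvChs nl L).length
        = (done.length + ((p :: L).length + ext.length)) + (pvChs nl (p :: L)).length := by
      simp only [pvChs, List.flatMap_cons, List.length_append, List.length_cons]; omega
    rw [e4, e5, e6]

theorem pv_A_run (omd : PySem.Dict String String) (m : Nat) :
    ∀ (d fuel : Nat), pvLevel omd (d + m) = [] →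
    tcoLoop (pvNL omd) ((pvLvlCat omd d m).length + fuel) (pvLvlCat omd 0 (d+1))
        (pvLvlCat omd 0 d).length (pvLvlCat omd 0 (d+1)).length
      = pvLvlCat omd 0 (d + m) := by
  induction m with
  | zero =>
    intro d fuel h
    rw [Nat.add_zero] at h ⊢
    have hq : pvLvlCat omd 0 (d+1) = pvLvlCat omd 0 d := by
      rw [pv_lvlCat_succ_right, Nat.zero_add, h, List.append_nil]
    rw [hq]
    exact pv_tco_stop _ _ _ _
  | succ m ih =>
    intro d fuel h
    have hcat : (pvLvlCat omd d (m+1)).length + fuel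
        = (pvLevel omd d).length + ((pvLvlCat omd (d+1) m).length + fuel) := by
      show (pvLevel omd d ++ pvLvlCat omd (d+1) m).length + fuel = _
      simp only [List.length_append]; omega
    rw [hcat]
    have hB := pv_A_block (pvNL omd) (pvLevel omd d) (pvLvlCat omd 0 d) []
      ((pvLvlCat omd (d+1) m).length + fuel)
    have e1 : pvLvlCat omd 0 d ++ (pvLevel omd d ++ []) = pvLvlCat omd 0 (d+1) := by
      rw [List.append_nil]
      have h1 := pv_lvlCat_succ_right omd d 0
      rw [Nat.zero_add] at h1
      exact h1.symm
    have e2 : (pvLvlCat omd 0 d).length + ((pvLevel omd d).length + ([] : List String).length)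
        = (pvLvlCat omd 0 (d+1)).length := by
      rw [← e1]; simp
    have e3 : pvLvlCat omd 0 (d+1) ++ pvChs (pvNL omd) (pvLevel omd d) = pvLvlCat omd 0 (d+2) := by
      have h1 := pv_lvlCat_succ_right omd (d+1) 0
      rw [Nat.zero_add] at h1
      exact h1.symm
    rw [e1, e2] at hB
    rw [hB]
    have e4 : (pvLvlCat omd 0 d).length + (pvLevel omd d).length = (pvLvlCat omd 0 (d+1)).length := by
      have h1 := pv_lvlCat_succ_right omd d 0
      rw [Nat.zero_add] at h1
      rw [h1]
      simp
    have e5 : (pvLvlCat omd 0 (d+1)).length + (pvChs (pvNL omd) (pvLevel omd d)).length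
        = (pvLvlCat omd 0 (d+2)).length := by
      rw [← e3]; simp
    rw [e3, e4, e5]
    have h' : pvLevel omd ((d+1) + m) = [] := by
      rw [show (d+1) + m = d + (m+1) by omega]; exact h
    have := ih (d+1) fuel h'
    rw [show (d+1) + m = d + (m+1) by omega] at this
    rw [show d + 1 + 1 = d + 2 by omega] at this
    exact this

theorem pv_get?_fold_insert_const (L : List String) :
    ∀ (D : PySem.Dict String Int) (v : Int) (x : String),
    (L.foldl (fun dd c => dd.insert c v) D).get? x = if x ∈ L then some v else D.get? x := by
  induction L with
  | nil => intro D v x; simp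
  | cons c L ih =>
    intro D v x
    show (L.foldl (fun dd c => dd.insert c v) (D.insert c v)).get? x = _
    rw [ih]
    rw [PySem.Dict.get?_insert]
    by_cases h1 : x ∈ L
    · simp [h1]
    · by_cases h2 : x = c <;> simp [h1, h2]

theorem pv_fill_level_eq (omd : PySem.Dict String String) (d : Nat) (L : List String) :
    ∀ (D : PySem.Dict String Int),
    (∀ c ∈ L, ∃ p, omd.get? c = some p ∧ D.get? p = some (d : Int) ∧ p ∉ L) →
    L.foldl (pvStepA omd) D = L.foldl (fun dd c => dd.insert c ((d : Int)+1)) D := by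
  induction L with
  | nil => intro D _; rfl
  | cons c L ih =>
    intro D hD
    obtain ⟨p, hg, hv, hnp⟩ := hD c (by simp)
    have hstep : pvStepA omd D c = D.insert c ((d : Int) + 1) := by
      simp [pvStepA, hg, hv]
    show L.foldl (pvStepA omd) (pvStepA omd D c) = _
    rw [hstep]
    show _ = L.foldl (fun dd c => dd.insert c ((d : Int)+1)) (D.insert c ((d : Int) + 1))
    refine ih _ ?_
    intro c' hc'
    obtain ⟨p', hg', hv', hnp'⟩ := hD c' (by simp [hc'])
    refine ⟨p', hg', ?_, fun hmem => hnp' (by simp [hmem])⟩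
    rw [PySem.Dict.get?_insert]
    rw [if_neg (by intro he; exact hnp' (by simp [he]))]
    exact hv'

theorem pv_fill_eq (omd : PySem.Dict String String) (N : Nat) (hnd : omd.keys.Nodup)
    (HP : ∀ k, 1 ≤ k → k ≤ N → pvPIter omd k "COM" ≠ some "COM") (m : Nat) :
    ∀ (d : Nat) (D : PySem.Dict String Int), d + m ≤ N →
    (∀ p ∈ pvLevel omd d, D.get? p = some (d : Int)) →
    (pvLvlCat omd (d+1) m).foldl (pvStepA omd) D = pvFill omd d m D := by
  induction m with
  | zero => intro d D _ _; rfl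
  | succ m ih =>
    intro d D hdm hInv
    show (pvLevel omd (d+1) ++ pvLvlCat omd (d+2) m).foldl (pvStepA omd) D = _
    rw [List.foldl_append]
    have hlevel : (pvLevel omd (d+1)).foldl (pvStepA omd) D
        = (pvLevel omd (d+1)).foldl (fun dd c => dd.insert c ((d : Int)+1)) D := by
      refine pv_fill_level_eq omd d (pvLevel omd (d+1)) D ?_
      intro c hc
      have hc' : c ∈ pvChs (pvNL omd) (pvLevel omd d) := hc
      rw [pv_mem_chs omd hnd] at hc'
      obtain ⟨p, hp, hg⟩ := hc'
      refine ⟨p, hg, hInv p hp, ?_⟩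
      intro hmem
      exact pv_level_disjoint omd N hnd HP (show d < d + 1 by omega) (by omega) p hp hmem
    rw [hlevel]
    show _ = pvFill omd (d+1) m ((pvLevel omd (d+1)).foldl (fun dd c => dd.insert c ((d : Int)+1)) D)
    refine ih (d+1) _ (by omega) ?_
    intro p hp
    rw [pv_get?_fold_insert_const]
    rw [if_pos hp]
    push_cast
    ring_nf

theorem pv_fill_empty (omd : PySem.Dict String String) (m : Nat) :
    ∀ (d : Nat) (D : PySem.Dict String Int), pvLevel omd d = [] → pvFill omd d m D = D := by
  induction m with
  | zero => intro d D _; rfl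
  | succ m ih =>
    intro d D h
    have h1 : pvLevel omd (d+1) = [] := by
      have := pv_level_empty_add omd 1 d h
      simpa using this
    show pvFill omd (d+1) m ((pvLevel omd (d+1)).foldl _ D) = D
    rw [h1]
    exact ih (d+1) D h1

theorem pv_fill_succ_right (omd : PySem.Dict String String) (m : Nat) :
    ∀ (d : Nat) (D : PySem.Dict String Int),
    pvFill omd d (m+1) D
      = (pvLevel omd (d+m+1)).foldl (fun dd c => dd.insert c (((d+m : Nat) : Int)+1))
          (pvFill omd d m D) := by
  induction m with
  | zero =>
    intro d D
    show pvFill omd (d+1) 0 _ = _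
    simp [pvFill]
  | succ m ih =>
    intro d D
    show pvFill omd (d+1) (m+1) ((pvLevel omd (d+1)).foldl _ D) = _
    rw [ih (d+1)]
    have e1 : d + 1 + m + 1 = d + (m + 1) + 1 := by omega
    have e2 : ((d + 1 + m : Nat) : Int) + 1 = ((d + (m+1) : Nat) : Int) + 1 := by push_cast; ring
    rw [e1, e2]
    rfl

-- B's per-level rescans of om equal the children-map expansion of A's analysis
theorem pv_B_expand (omd : PySem.Dict String String) (L : List String) :
    L.flatMap (fun p => (omd.items.filter (fun cq => cq.2 == p)).map (fun cq => cq.1))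
      = pvChs (pvNL omd) L := by
  unfold pvChs
  refine List.flatMap_congr ?_
  intro p _
  exact (pv_chf_eq omd p).symm

-- B's loop, related to pvFill: from state (D, level d, depth d) with m levels to go
theorem pv_B_run (omd : PySem.Dict String String) (m : Nat) :
    ∀ (d fuel : Nat) (D : PySem.Dict String Int), pvLevel omd (d + m) = [] → m ≤ fuel →
    tcoAltLoop omd.items (fuel + 1) D (pvLevel omd d) (d : Int)
      = pvFill omd d m ((pvLevel omd d).foldl (fun dd n => dd.insert n (d : Int)) D) := by
  induction m with
  | zero =>
    intro d fuel D h _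
    rw [Nat.add_zero] at h
    show (if (pvLevel omd d).isEmpty then D else _) = _
    rw [h]
    simp [pvFill]
  | succ m ih =>
    intro d fuel D h hm
    by_cases hL : pvLevel omd d = []
    · have hempty : pvFill omd d (m+1) ((pvLevel omd d).foldl (fun dd n => dd.insert n (d : Int)) D)
          = D := by
        rw [hL]
        exact pv_fill_empty omd (m+1) d D hL
      rw [hempty]
      show (if (pvLevel omd d).isEmpty then D else _) = D
      rw [hL]
      simp
    · cases fuel with
      | zero => omega
      | succ fuel =>
        show (if (pvLevel omd d).isEmpty then D else _) = _
        rw [if_neg (by simpa using hL)]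
        show tcoAltLoop omd.items (fuel + 1)
            ((pvLevel omd d).foldl (fun dd n => dd.insert n (d : Int)) D)
            ((pvLevel omd d).flatMap
              (fun p => (omd.items.filter (fun cq => cq.2 == p)).map (fun cq => cq.1)))
            ((d : Int) + 1)
          = _
        rw [pv_B_expand omd (pvLevel omd d)]
        have hnext : pvChs (pvNL omd) (pvLevel omd d) = pvLevel omd (d+1) := rfl
        rw [hnext]
        have hcast : ((d : Int) + 1) = (((d+1 : Nat)) : Int) := by push_cast; ring
        rw [hcast]
        have h' : pvLevel omd ((d+1) + m) = [] := by
          rw [show d+1+m = d+(m+1) by omega]; exact h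
        rw [ih (d+1) fuel ((pvLevel omd d).foldl (fun dd n => dd.insert n (d : Int)) D) h' (by omega)]
        rfl

theorem pv_main (om : List (String × String)) (hpre : Pre_total_cumulative_orbits om) :
    total_cumulative_orbits om = total_cumulative_orbits_alt om := by
  have hnd : (PySem.Dict.ofList om).keys.Nodup := PySem.Dict.nodup_keys_ofList om
  simp only [total_cumulative_orbits, total_cumulative_orbits_alt]
  set omd := PySem.Dict.ofList om with homd
  have HP : ∀ k, 1 ≤ k → k ≤ om.length + 1 → pvPIter omd k "COM" ≠ some "COM" := by
    intro k h1 h2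
    exact hpre k (by omega) h1
  have hkeys : omd.keys.length ≤ om.length := by
    have h1 : omd.keys = PySem.Set.ofList (om.map Prod.fst) := by
      rw [homd]
      show (om.foldl (fun acc p => acc.insert p.1 p.2) PySem.Dict.empty).keys = _
      rw [PySem.Dict.keys_foldl_insert_key om Prod.fst (fun _ x => x.2) PySem.Dict.empty]
      rw [PySem.Dict.keys_empty, PySem.Set.update_nil_left]
    rw [h1]
    exact (PySem.Set.length_ofList_le _).trans (by simp)
  have hNempty : pvLevel omd (om.length + 1) = [] :=
    pv_level_N_empty omd (om.length + 1) hnd HP (by omega)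
  -- fold A's children-map builder into pvNL omd
  rw [pv_builder_eq omd.items]
  rw [show omd.items.foldl (fun nl cp => nl.modify cp.2 [] (fun l => l ++ [cp.1])) PySem.Dict.empty
        = pvNL omd from rfl]
  -- A's queue equals the concatenation of all levels
  have hlen1 : (pvLvlCat omd 1 om.length).length ≤ om.length := by
    have hnodup := pv_nodup_lvlCat omd (om.length+1) hnd HP om.length 1 (by omega)
    have hsub : pvLvlCat omd 1 om.length ⊆ omd.keys :=
      fun n hn => pv_lvlCat_sub_keys omd hnd om.length n hn
    exact (pv_length_le_of_nodup_subset _ _ hnodup hsub).trans hkeys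
  have hlenQ : (pvLvlCat omd 0 (om.length + 1)).length ≤ om.length + 1 := by
    have h2 : pvLvlCat omd 0 (om.length + 1) = pvLevel omd 0 ++ pvLvlCat omd 1 om.length := rfl
    rw [h2, List.length_append]
    have : (pvLevel omd 0).length = 1 := rfl
    omega
  have hrun := pv_A_run omd (om.length + 1) 0
    (om.length + 1 - (pvLvlCat omd 0 (om.length + 1)).length)
    (by rw [Nat.zero_add]; exact hNempty)
  simp only [Nat.zero_add] at hrun
  have hfuel : (pvLvlCat omd 0 (om.length + 1)).length
      + (om.length + 1 - (pvLvlCat omd 0 (om.length + 1)).length) = om.length + 1 := by omega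
  rw [hfuel] at hrun
  rw [show pvLvlCat omd 0 1 = ["COM"] from rfl] at hrun
  rw [show (pvLvlCat omd 0 0).length = 0 from rfl] at hrun
  rw [show (["COM"] : List String).length = 1 from rfl] at hrun
  rw [hrun]
  -- A's fill pass over q[1:]
  rw [PySem.List.slice_from_one]
  rw [show (pvLvlCat omd 0 (om.length + 1)).tail = pvLvlCat omd (0+1) om.length from rfl]
  rw [show (fun (d : PySem.Dict String Int) node =>
        match omd.get? node with
        | some p =>
          match d.get? p with
          | some v => d.insert node (v + 1)
          | none => d
        | none => d) = pvStepA omd from rfl]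
  have hInv0 : ∀ p ∈ pvLevel omd 0,
      (PySem.Dict.empty.insert "COM" (0 : Int)).get? p = some ((0 : Nat) : Int) := by
    intro p hp
    have hp' : p = "COM" := by simpa [pvLevel] using hp
    subst hp'
    rw [PySem.Dict.get?_insert_self]
    norm_num
  rw [pv_fill_eq omd (om.length + 1) hnd HP om.length 0
    (PySem.Dict.empty.insert "COM" 0) (by omega) hInv0]
  -- B's loop: om.length + 2 = (om.length + 1) + 1 fuel, m = om.length + 1 levels
  have hB := pv_B_run omd (om.length + 1) 0 (om.length + 1) PySem.Dict.empty
    (by rw [Nat.zero_add]; exact hNempty) (le_refl _)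
  rw [show pvLevel omd 0 = ["COM"] from rfl] at hB
  rw [show ((0 : Nat) : Int) = (0 : Int) from rfl] at hB
  rw [show (["COM"] : List String).foldl (fun dd n => dd.insert n (0 : Int)) PySem.Dict.empty
        = PySem.Dict.empty.insert "COM" 0 from rfl] at hB
  rw [show om.length + 2 = (om.length + 1) + 1 by omega]
  rw [hB]
  -- the extra (empty) level at the end of B's run changes nothing
  have hfinal : pvFill omd 0 (om.length + 1) (PySem.Dict.empty.insert "COM" 0)
      = pvFill omd 0 om.length (PySem.Dict.empty.insert "COM" 0) := by
    rw [pv_fill_succ_right omd om.length 0]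
    rw [show (0 : Nat) + om.length + 1 = om.length + 1 from by omega]
    rw [hNempty]
    rfl
  rw [hfinal]

-- ===== VERDICT (by name: the statement is the Claim_ definition above) =====
theorem total_cumulative_orbits_spec : Claim_equal_total_cumulative_orbits := by
  intro om _hdom hpre
  exact pv_main om hpre
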